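-- pv_equiv track=rewrite | github.com/guige2023/rabai_autoclick | actions/data/data_imputer_action.py | impute_backward_fill
-- ===== SOURCE A (Python) =====
-- from typing import Any, Callable, Dict, List, Optional, Tuple, Union
--
-- def impute_backward_fill(data: List[Any]) -> List[Any]:
--     """Impute missing values using backward fill."""
--     result = [None] * len(data)
--     next_valid = None
--
--     for i in range(len(data) - 1, -1, -1):
--         v = data[i]
--         if v is not None and v != "":
--             result[i] = v
--             next_valid = v
--         else:
--             result[i] = next_valid
--
--     return result
-- ===== SOURCE B (Python) =====
-- from typing import Any, List
--
-- def impute_backward_fill(data: List[Any]) -> List[Any]: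
--     """Impute missing values using backward fill (forward pass with a pending-gap counter)."""
--     out: List[Any] = []
--     pending = 0
--     for v in data:
--         if v is not None and v != "":
--             out.extend([v] * (pending + 1))
--             pending = 0
--         else:
--             pending += 1
--     out.extend([None] * pending)
--     return out
-- ===== Notes on version B (the rewrite author's own statement) =====
-- stated objective: alternative
-- what changed: Replaces the backward index loop carrying next_valid with a single forward pass that counts pending missing slots and flushes each run as (pending+1) copies of the next valid value, trailing missing slots becoming None.
import Mathlib
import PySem

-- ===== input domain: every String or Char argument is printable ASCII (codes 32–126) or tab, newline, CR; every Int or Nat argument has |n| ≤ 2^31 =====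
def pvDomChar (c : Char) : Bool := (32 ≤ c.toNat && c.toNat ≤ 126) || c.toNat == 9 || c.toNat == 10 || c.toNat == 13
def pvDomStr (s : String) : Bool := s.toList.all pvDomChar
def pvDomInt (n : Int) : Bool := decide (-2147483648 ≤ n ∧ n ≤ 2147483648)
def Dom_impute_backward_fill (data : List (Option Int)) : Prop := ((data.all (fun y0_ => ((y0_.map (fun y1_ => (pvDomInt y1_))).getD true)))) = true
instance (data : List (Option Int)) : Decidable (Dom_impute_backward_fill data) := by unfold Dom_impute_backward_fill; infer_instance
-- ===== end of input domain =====

-- B: forward pass with a pending-gap counter instead of A's backward loop carrying next_valid (alternative decomposition, same cost).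

-- ===== PORT A =====
-- A loops i from len-1 down to 0 carrying next_valid; ported as structural recursion
-- from the right over the list, returning (next_valid, result).
def imputeA_go : List (Option Int) → Option Int × List (Option Int)
  | [] => (none, [])
  | v :: xs =>
    let s := imputeA_go xs
    match v with
    | some x => (some x, some x :: s.2)
    | none => (s.1, s.1 :: s.2)

def impute_backward_fill (data : List (Option Int)) : List (Option Int) :=
  (imputeA_go data).2

-- ===== PORT B =====
def imputeB_step (st : List (Option Int) × Nat) (v : Option Int) : List (Option Int) × Nat :=
  match v with
  | some x => (st.1 ++ List.replicate (st.2 + 1) (some x), 0)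
  | none => (st.1, st.2 + 1)

def impute_backward_fill_alt (data : List (Option Int)) : List (Option Int) :=
  let st := data.foldl imputeB_step ([], 0)
  st.1 ++ List.replicate st.2 none

-- ===== PRECONDITION & SPEC =====
def Spec_impute_backward_fill (data : List (Option Int)) (out : List (Option Int)) : Prop := out = impute_backward_fill_alt data
instance (data : List (Option Int)) (out : List (Option Int)) : Decidable (Spec_impute_backward_fill data out) := by unfold Spec_impute_backward_fill; infer_instance

-- ===== CLAIM (what is proved, stated in full; the proofs are below) =====
def Claim_equal_impute_backward_fill : Prop := ∀ (data : List (Option Int)), Dom_impute_backward_fill data → Spec_impute_backward_fill data (impute_backward_fill data)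

-- ===== LEMMAS AND PROOFS =====

lemma imputeB_loop (xs : List (Option Int)) : ∀ (acc : List (Option Int)) (k : Nat),
    (let st := xs.foldl imputeB_step (acc, k); st.1 ++ List.replicate st.2 none)
      = acc ++ List.replicate k ((imputeA_go xs).1) ++ (imputeA_go xs).2 := by
  induction xs with
  | nil => intro acc k; simp [imputeA_go]
  | cons v xs ih =>
    intro acc k
    cases v with
    | some x =>
      simp only [List.foldl_cons, imputeB_step, imputeA_go]
      rw [ih]
      simp [List.replicate_succ', List.append_assoc]
    | none =>
      simp only [List.foldl_cons, imputeB_step, imputeA_go]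
      rw [ih]
      simp [List.replicate_succ', List.append_assoc]

-- ===== VERDICT (by name: the statement is the Claim_ definition above) =====
theorem impute_backward_fill_spec : Claim_equal_impute_backward_fill := by
  intro data _
  unfold Spec_impute_backward_fill impute_backward_fill impute_backward_fill_alt
  have h := imputeB_loop data [] 0
  simpa using h.symm
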